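-- pv_equiv track=rewrite | github.com/vinodhinia/Python-for-Programmers-Advanced- | application/utils/assignment_11_1.py | GiveAsciiChart
-- ===== SOURCE A (Python) =====
-- START = 32
--
-- END = 126
--
-- def GiveAsciiChart(start = START, end = END):
--     diff = end - start + 1
--     cols = int(diff/4)
--     charArr = []
--     if(cols%4):
--         cols +=1
--     for row in range(cols):
--         for column in range(4):
--             entry = cols * column + row + start
--             if entry > end:
--                 break
--             charArr += ['{} = {}'.format(entry,chr(entry))]
--             charArr += [' ']
--         charArr += ['\n']
--     return ''.join(charArr)
-- ===== SOURCE B (Python) =====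
-- START = 32
--
-- END = 126
--
-- def GiveAsciiChart(start = START, end = END):
--     cols = (end - start + 1) // 4
--     if cols % 4:
--         cols += 1
--     cells = ['{} = {} '.format(e, chr(e)) for e in range(start, end + 1)]
--     chunks = [cells[c * cols:(c + 1) * cols] for c in range(4)]
--     lines = [''.join(chunk[r] for chunk in chunks if r < len(chunk)) + '\n'
--              for r in range(cols)]
--     return ''.join(lines)
-- ===== Notes on version B (the rewrite author's own statement) =====
-- stated objective: alternative
-- what changed: B replaces A's nested row/column loop that recomputes each entry by index arithmetic with a build-once flat cell list that is cut into the four column chunks and transposed row by row; Pre_ excludes ranges whose code points make chr raise (B formats all cells up front, so it raises where A short-circuits to '' on 1-3-wide invalid ranges) and ranges reaching the surrogate code points 0xD800-0xDFFF, whose lone-surrogate output is not a valid Unicode string representable as the declared Lean String type.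
-- outside the precondition, e.g. on GiveAsciiChart(-3, -1): A returns '', B raises ValueError; on GiveAsciiChart(55296, 55297): A returns '', B returns ''
import Mathlib
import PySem

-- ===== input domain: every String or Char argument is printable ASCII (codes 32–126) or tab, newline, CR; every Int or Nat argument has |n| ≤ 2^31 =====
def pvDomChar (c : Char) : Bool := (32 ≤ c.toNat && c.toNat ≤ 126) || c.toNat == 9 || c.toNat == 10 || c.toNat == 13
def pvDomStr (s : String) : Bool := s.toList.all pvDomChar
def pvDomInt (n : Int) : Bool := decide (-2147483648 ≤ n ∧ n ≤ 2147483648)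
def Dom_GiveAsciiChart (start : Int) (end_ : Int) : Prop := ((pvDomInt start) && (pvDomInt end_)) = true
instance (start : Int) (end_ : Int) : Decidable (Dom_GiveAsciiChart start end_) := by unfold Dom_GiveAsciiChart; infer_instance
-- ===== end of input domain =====

-- B builds the flat cell list once, cuts it into the four column chunks and transposes them row by
-- row, instead of A's per-cell index arithmetic inside a nested row/column loop (objective:
-- alternative decomposition, same cost).

-- ===== PORT A =====
-- '{} = {}'.format(entry, chr(entry))
def pvFmtA (e : Int) : String := PySem.Int.toStr e ++ " = " ++ String.singleton (Char.ofNat e.toNat)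

-- the inner 'for column in range(4): … if entry > end: break …' loop, acc-passing, break = stop
def pvInnerA (start end_ cols row : Int) : List Int → List String → List String
  | [], acc => acc
  | c :: cs, acc =>
    let entry := cols * c + row + start
    if entry > end_ then acc
    else pvInnerA start end_ cols row cs (acc ++ [pvFmtA entry] ++ [" "])

def GiveAsciiChart (start : Int) (end_ : Int) : String :=
  let diff := end_ - start + 1
  let cols₀ := PySem.Int.truncdiv diff 4            -- int(diff/4): exact trunc (float division by 4 is exact on the domain)
  let cols := if PySem.Int.mod cols₀ 4 ≠ 0 then cols₀ + 1 else cols₀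
  let charArr := (PySem.List.pyRange 0 cols 1).foldl
    (fun acc row => (pvInnerA start end_ cols row (PySem.List.pyRange 0 4 1) acc) ++ ["\n"]) []
  PySem.Str.join "" charArr

-- ===== PORT B =====
-- '{} = {} '.format(e, chr(e))
def pvCellB (e : Int) : String := PySem.Int.toStr e ++ " = " ++ String.singleton (Char.ofNat e.toNat) ++ " "

def GiveAsciiChart_alt (start : Int) (end_ : Int) : String :=
  let cols₀ := PySem.Int.floordiv (end_ - start + 1) 4
  let cols := if PySem.Int.mod cols₀ 4 ≠ 0 then cols₀ + 1 else cols₀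
  let cells := (PySem.List.pyRange start (end_ + 1) 1).map pvCellB
  let chunks := (PySem.List.pyRange 0 4 1).map
    (fun c => PySem.List.slice cells (some (c * cols)) (some ((c + 1) * cols)))
  let lines := (PySem.List.pyRange 0 cols 1).map
    (fun r => PySem.Str.join "" ((chunks.filter (fun ch => decide (r < (ch.length : Int)))).map
        (fun ch => PySem.List.pyGetD ch r "")) ++ "\n")
  PySem.Str.join "" lines

-- ===== PRECONDITION & SPEC =====
-- Pre_ excludes ranges on which chr raises ValueError (a code point < 0 or > 0x10FFFF in
-- range(start, end+1)): A raises there too except on 1–3-wide ranges, where it returns '' before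
-- calling chr while B, which formats every cell up front, raises; and it excludes ranges reaching
-- the surrogate code points 0xD800–0xDFFF, where chr yields lone surrogates that are not Unicode
-- scalar values and so not representable in the declared Lean Char/String types.
def Pre_GiveAsciiChart (start : Int) (end_ : Int) : Prop :=
  end_ < start ∨ (0 ≤ start ∧ end_ ≤ 1114111 ∧ (end_ < 55296 ∨ 57344 ≤ start))
instance (start : Int) (end_ : Int) : Decidable (Pre_GiveAsciiChart start end_) := by
  unfold Pre_GiveAsciiChart; infer_instance
def pvWitness_GiveAsciiChart : Int × Int := (32, 46)

def Spec_GiveAsciiChart (start : Int) (end_ : Int) (out : String) : Prop := out = GiveAsciiChart_alt start end_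
instance (start : Int) (end_ : Int) (out : String) : Decidable (Spec_GiveAsciiChart start end_ out) := by unfold Spec_GiveAsciiChart; infer_instance

-- ===== CLAIM (what is proved, stated in full; the proofs are below) =====
def Claim_equal_GiveAsciiChart : Prop := ∀ (start : Int) (end_ : Int), Dom_GiveAsciiChart start end_ → Pre_GiveAsciiChart start end_ → Spec_GiveAsciiChart start end_ (GiveAsciiChart start end_)

-- ===== LEMMAS AND PROOFS =====

-- the characters of one chart cell (entry text, ' = ', the character, the trailing blank)
def pvCellChars (e : Int) : List Char :=
  PySem.Int.toChars e ++ [' ', '=', ' ', Char.ofNat e.toNat, ' ']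

-- the characters of one chart row, as both programs produce it
def pvRowChars (start end_ cols r : Int) : List Char :=
  ([0, 1, 2, 3].flatMap
    (fun c => if cols * c + r + start ≤ end_ then pvCellChars (cols * c + r + start) else [])) ++ ['\n']

theorem pvFlatten_intersperse_nil {α : Type} (parts : List (List α)) :
    (List.intersperse [] parts).flatten = parts.flatten := by
  induction parts with
  | nil => rfl
  | cons p ps ih =>
    cases ps with
    | nil => rfl
    | cons q qs => simpa [List.intersperse] using ih

theorem pvJoinNil (parts : List (List Char)) :
    PySem.Chars.join [] parts = parts.flatten := by
  simpa [PySem.Chars.join, List.intercalate] using pvFlatten_intersperse_nil parts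

theorem pvJoin_toList (parts : List String) :
    (PySem.Str.join "" parts).toList = (parts.map String.toList).flatten := by
  rw [PySem.Str.toList_join]
  simpa [PySem.Chars.join, List.intercalate] using pvFlatten_intersperse_nil (parts.map String.toList)

-- for diff ≥ 4, A's int(diff/4) and B's diff // 4 coincide
theorem pvCols_eq (d : Int) (h : 4 ≤ d) :
    PySem.Int.truncdiv d 4 = PySem.Int.floordiv d 4 := by
  simp only [PySem.Int.floordiv, PySem.Int.truncdiv, Int.fdiv_eq_ediv, Int.tdiv_eq_ediv,
    show ((4:Int).sign = 1) from rfl]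
  split_ifs <;> omega

-- for diff < 4 both adjusted column counts are ≤ 0, so both charts are empty
theorem pvColsA_nonpos (d : Int) (h : d < 4) :
    (if PySem.Int.mod (PySem.Int.truncdiv d 4) 4 ≠ 0 then PySem.Int.truncdiv d 4 + 1
     else PySem.Int.truncdiv d 4) ≤ 0 := by
  have h0 : PySem.Int.truncdiv d 4 ≤ 0 := by
    simp only [PySem.Int.truncdiv, Int.tdiv_eq_ediv, show ((4:Int).sign = 1) from rfl]
    split_ifs <;> omega
  split_ifs with hm
  · have : PySem.Int.truncdiv d 4 ≠ 0 := by
      intro h1; rw [h1] at hm; exact hm rfl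
    omega
  · exact h0

theorem pvColsB_nonpos (d : Int) (h : d < 4) :
    (if PySem.Int.mod (PySem.Int.floordiv d 4) 4 ≠ 0 then PySem.Int.floordiv d 4 + 1
     else PySem.Int.floordiv d 4) ≤ 0 := by
  have h0 : PySem.Int.floordiv d 4 ≤ 0 := by
    simp only [PySem.Int.floordiv, Int.fdiv_eq_ediv]
    omega
  split_ifs with hm
  · have : PySem.Int.floordiv d 4 ≠ 0 := by
      intro h1; rw [h1] at hm; exact hm rfl
    omega
  · exact h0

theorem pvColsB_pos (d : Int) (h : 4 ≤ d) :
    0 < (if PySem.Int.mod (PySem.Int.floordiv d 4) 4 ≠ 0 then PySem.Int.floordiv d 4 + 1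
     else PySem.Int.floordiv d 4) := by
  have h0 : 1 ≤ PySem.Int.floordiv d 4 := by
    simp only [PySem.Int.floordiv, Int.fdiv_eq_ediv]
    omega
  split_ifs <;> omega

theorem pvInnerA_acc (start end_ cols row : Int) (cs : List Int) (acc : List String) :
    pvInnerA start end_ cols row cs acc = acc ++ pvInnerA start end_ cols row cs [] := by
  induction cs generalizing acc with
  | nil => simp [pvInnerA]
  | cons c cs ih =>
    simp only [pvInnerA]
    split
    · simp
    · rw [ih, ih ([] ++ [pvFmtA (cols * c + row + start)] ++ [" "])]
      simp

theorem pvRowA (start end_ cols r : Int) (hc : 0 < cols) :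
    ((pvInnerA start end_ cols r (PySem.List.pyRange 0 4 1) [] ++ ["\n"]).map String.toList).flatten
      = pvRowChars start end_ cols r := by
  have h4 : PySem.List.pyRange 0 4 1 = [0,1,2,3] := by decide
  rw [h4]
  simp only [pvInnerA, pvRowChars, pvCellChars, pvFmtA]
  split_ifs <;>
    simp_all [PySem.Int.toList_toStr, String.singleton] <;> split_ifs <;>
      first | (exfalso; omega) | simp_all

theorem pvChunkB (start end_ cols c r : Int) (hc : 0 < cols) (hc0 : 0 ≤ c) (hr0 : 0 ≤ r) (hr : r < cols) :
    ((r < ((PySem.List.slice ((PySem.List.pyRange start (end_ + 1) 1).map pvCellB) (some (c * cols)) (some ((c + 1) * cols))).length : Int)) ↔ cols * c + r + start ≤ end_)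
    ∧ (cols * c + r + start ≤ end_ →
        PySem.List.pyGetD (PySem.List.slice ((PySem.List.pyRange start (end_ + 1) 1).map pvCellB) (some (c * cols)) (some ((c + 1) * cols))) r ""
          = pvCellB (cols * c + r + start)) := by
  have ha : 0 ≤ c * cols := mul_nonneg hc0 (le_of_lt hc)
  have hb : 0 ≤ (c + 1) * cols := mul_nonneg (by omega) (le_of_lt hc)
  have hring : (c + 1) * cols = c * cols + cols := by ring
  have hcomm : cols * c = c * cols := mul_comm _ _
  rw [PySem.List.slice_toNat _ ha hb]
  have hlenrange : (PySem.List.pyRange start (end_ + 1) 1).length = (end_ + 1 - start).toNat :=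
    PySem.List.length_pyRange_one _ _
  have hlen : ((((PySem.List.pyRange start (end_ + 1) 1).map pvCellB).drop (c * cols).toNat).take (((c + 1) * cols).toNat - (c * cols).toNat)).length
      = min (((c + 1) * cols).toNat - (c * cols).toNat) ((end_ + 1 - start).toNat - (c * cols).toNat) := by
    simp [hlenrange]
  constructor
  · rw [hlen, hcomm]
    omega
  · intro hle
    rw [PySem.List.pyGetD_eq_getElem _ _ hr0 (by rw [hlen]; omega)]
    rw [List.getElem_take, List.getElem_drop, List.getElem_map, PySem.List.getElem_pyRange_one]
    congr 1
    omega

theorem pvCellB_toList (e : Int) : (pvCellB e).toList = pvCellChars e := by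
  simp [pvCellB, pvCellChars, PySem.Int.toList_toStr, String.singleton]

theorem pvRowB (start end_ cols r : Int) (hc : 0 < cols) (hr0 : 0 ≤ r) (hr : r < cols) :
    (PySem.Str.join "" ((((PySem.List.pyRange 0 4 1).map (fun c => PySem.List.slice ((PySem.List.pyRange start (end_ + 1) 1).map pvCellB) (some (c * cols)) (some ((c + 1) * cols)))).filter (fun ch => decide (r < (ch.length : Int)))).map (fun ch => PySem.List.pyGetD ch r "")) ++ "\n").toList
      = pvRowChars start end_ cols r := by
  have h4 : PySem.List.pyRange 0 4 1 = [0,1,2,3] := by decide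
  rw [h4]
  have h0 := pvChunkB start end_ cols 0 r hc (by omega) hr0 hr
  have h1 := pvChunkB start end_ cols 1 r hc (by omega) hr0 hr
  have h2 := pvChunkB start end_ cols 2 r hc (by omega) hr0 hr
  have h3 := pvChunkB start end_ cols 3 r hc (by omega) hr0 hr
  simp only [List.map_cons, List.map_nil, List.filter_cons, List.filter_nil,
    decide_eq_true_eq, h0.1, h1.1, h2.1, h3.1, pvRowChars]
  split_ifs with p0 p1 p2 p3 <;>
    first
      | (exfalso; omega)
      | (simp_all [pvCellB_toList, pvJoinNil] <;>
          (split_ifs <;> first | (exfalso; omega) | simp))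

theorem pvFlatMap_congr {α β : Type} (l : List α) (f g : α → List β)
    (h : ∀ a ∈ l, f a = g a) : l.flatMap f = l.flatMap g := by
  simp [List.flatMap_def, List.map_congr_left h]

theorem pvFlatten_map_flatMap {α : Type} (l : List α) (g : α → List String) :
    ((l.flatMap g).map String.toList).flatten
      = l.flatMap (fun a => ((g a).map String.toList).flatten) := by
  induction l with
  | nil => rfl
  | cons a l ih => simp [List.flatMap_cons, ih]

-- ===== VERDICT (by name: the statement is the Claim_ definition above) =====
theorem GiveAsciiChart_spec : Claim_equal_GiveAsciiChart := by
  intro start end_ _ _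
  show GiveAsciiChart start end_ = GiveAsciiChart_alt start end_
  simp only [GiveAsciiChart, GiveAsciiChart_alt]
  by_cases hge : 4 ≤ end_ - start + 1
  · rw [pvCols_eq _ hge]
    generalize hq : (if PySem.Int.mod (PySem.Int.floordiv (end_ - start + 1) 4) 4 ≠ 0
      then PySem.Int.floordiv (end_ - start + 1) 4 + 1
      else PySem.Int.floordiv (end_ - start + 1) 4) = cols
    have hc : 0 < cols := hq ▸ pvColsB_pos _ hge
    have hbody : (fun (acc : List String) row =>
        pvInnerA start end_ cols row (PySem.List.pyRange 0 4 1) acc ++ ["\n"])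
        = fun acc row => acc ++ (pvInnerA start end_ cols row (PySem.List.pyRange 0 4 1) [] ++ ["\n"]) := by
      funext acc row
      rw [pvInnerA_acc]
      simp
    rw [hbody, PySem.List.foldl_append_eq_flatMap]
    apply String.toList_inj.mp
    rw [pvJoin_toList, pvJoin_toList, List.nil_append, pvFlatten_map_flatMap,
      ← List.flatMap_def, List.flatMap_map]
    apply pvFlatMap_congr
    intro r hrmem
    have hrb := (PySem.List.mem_pyRange_one.mp hrmem)
    rw [pvRowA start end_ cols r hc]
    exact (pvRowB start end_ cols r hc hrb.1 hrb.2).symm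
  · have hA := pvColsA_nonpos (end_ - start + 1) (by omega)
    have hB := pvColsB_nonpos (end_ - start + 1) (by omega)
    rw [PySem.List.pyRange_one_eq_nil hA, PySem.List.pyRange_one_eq_nil hB]
    rfl
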